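-- pv_equiv track=rewrite | github.com/Rafeh-18/Intelligent-University-Timetabling-Multi-Agent-System | utils.py | format_timetable
-- ===== SOURCE A (Python) =====
-- DAYS = ["Monday", "Tuesday", "Wednesday", "Thursday", "Friday", "Saturday"]
--
-- TIME_SLOTS = [
--     "08:30-10:00",
--     "10:15-11:45",
--     "13:00-14:30",
--     "14:45-16:15",
--     "16:15-18:00",
-- ]
--
-- def format_timetable(schedule):
--     """Convert flat schedule list to { day: { slot: [sessions] } } dict."""
--     timetable = {day: {slot: [] for slot in TIME_SLOTS} for day in DAYS}
--     for session in schedule: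
--         day  = session.get("day")
--         slot = session.get("time_slot")
--         if day in timetable and slot in timetable[day]:
--             timetable[day][slot].append(session)
--     return timetable
-- ===== SOURCE B (Python) =====
-- DAYS = ["Monday", "Tuesday", "Wednesday", "Thursday", "Friday", "Saturday"]
--
-- TIME_SLOTS = [
--     "08:30-10:00",
--     "10:15-11:45",
--     "13:00-14:30",
--     "14:45-16:15",
--     "16:15-18:00",
-- ]
--
-- def format_timetable(schedule):
--     """Convert flat schedule list to { day: { slot: [sessions] } } dict.
--
--     Grid-driven and stateless: each (day, slot) cell is computed independently
--     by filtering the schedule for sessions located there; filtering preserves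
--     the schedule order, and sessions with an invalid day/slot match no cell."""
--     return {day: {slot: [s for s in schedule
--                          if s.get("day") == day and s.get("time_slot") == slot]
--                   for slot in TIME_SLOTS}
--             for day in DAYS}
-- ===== Notes on version B (the rewrite author's own statement) =====
-- stated objective: alternative
-- what changed: B is stateless and grid-driven: each (day, slot) cell of the result is computed independently as a filter of the schedule, instead of A's single mutating pass that tests each session's validity and appends it into a pre-built nested skeleton.
import Mathlib
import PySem

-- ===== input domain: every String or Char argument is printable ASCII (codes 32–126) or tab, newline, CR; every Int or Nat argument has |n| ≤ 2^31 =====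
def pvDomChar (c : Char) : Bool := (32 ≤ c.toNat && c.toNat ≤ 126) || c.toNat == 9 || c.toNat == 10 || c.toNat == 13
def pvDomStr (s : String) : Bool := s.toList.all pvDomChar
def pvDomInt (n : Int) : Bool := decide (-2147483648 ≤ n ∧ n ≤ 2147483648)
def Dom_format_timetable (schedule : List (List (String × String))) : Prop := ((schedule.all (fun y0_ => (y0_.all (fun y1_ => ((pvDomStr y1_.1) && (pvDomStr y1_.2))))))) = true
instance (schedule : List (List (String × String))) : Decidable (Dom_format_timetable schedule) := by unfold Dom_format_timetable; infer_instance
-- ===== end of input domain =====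

-- B is stateless and grid-driven: each (day, slot) cell is an independent filter of the
-- schedule, instead of A's single mutating pass appending into a pre-built nested skeleton
-- (objective: alternative decomposition, same practical cost).

def pvDAYS : List String := ["Monday", "Tuesday", "Wednesday", "Thursday", "Friday", "Saturday"]

def pvSLOTS : List String := ["08:30-10:00", "10:15-11:45", "13:00-14:30", "14:45-16:15", "16:15-18:00"]

-- session.get(k): first-match lookup in the association list (Python dict get)
def pvGet (session : List (String × String)) (k : String) : Option String :=
  (PySem.Dict.mk session).get? k

-- ===== PORT A =====
-- the body of A's for-loop
def pvStepA (tt : PySem.Dict String (PySem.Dict String (List (List (String × String)))))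
    (session : List (String × String)) :
    PySem.Dict String (PySem.Dict String (List (List (String × String)))) :=
  let day := pvGet session "day"
  let slot := pvGet session "time_slot"
  match day, slot with
  | some d, some s =>
      if tt.contains d && (tt.getD d PySem.Dict.empty).contains s then
        tt.modify d PySem.Dict.empty (fun inner => inner.modify s [] (fun l => l ++ [session]))
      else tt
  | _, _ => tt  -- 'None in timetable' / 'None in timetable[day]' is False

def format_timetable (schedule : List (List (String × String))) : List (String × List (String × List (List (String × String)))) :=
  let timetable : PySem.Dict String (PySem.Dict String (List (List (String × String)))) :=
    PySem.Dict.ofList (pvDAYS.map (fun day =>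
      (day, PySem.Dict.ofList (pvSLOTS.map (fun slot => (slot, ([] : List (List (String × String)))))))))
  let final := schedule.foldl pvStepA timetable
  final.items.map (fun p => (p.1, p.2.items))

-- ===== PORT B =====
-- B's cell predicate: s.get("day") == day and s.get("time_slot") == slot
def pvCell (day slot : String) (s : List (String × String)) : Bool :=
  pvGet s "day" == some day && pvGet s "time_slot" == some slot

def format_timetable_alt (schedule : List (List (String × String))) : List (String × List (String × List (List (String × String)))) :=
  pvDAYS.map (fun day =>
    (day, pvSLOTS.map (fun slot => (slot, schedule.filter (pvCell day slot)))))

-- ===== PRECONDITION & SPEC =====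
def Spec_format_timetable (schedule : List (List (String × String))) (out : List (String × List (String × List (List (String × String))))) : Prop := out = format_timetable_alt schedule
instance (schedule : List (List (String × String))) (out : List (String × List (String × List (List (String × String))))) : Decidable (Spec_format_timetable schedule out) := by
  unfold Spec_format_timetable
  have d3 : DecidableEq (List (String × List (List (String × String)))) := inferInstance
  have d4 : DecidableEq (String × List (String × List (List (String × String)))) := inferInstance
  have d5 : DecidableEq (List (String × List (String × List (List (String × String))))) := inferInstance
  exact d5 out (format_timetable_alt schedule)

-- ===== CLAIM (what is proved, stated in full; the proofs are below) =====
def Claim_equal_format_timetable : Prop := ∀ (schedule : List (List (String × String))), Dom_format_timetable schedule → Spec_format_timetable schedule (format_timetable schedule)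

-- ===== LEMMAS AND PROOFS =====

-- A's nested state, laid out from a cell-contents function f
def pvGridF (f : String → String → List (List (String × String))) :
    PySem.Dict String (PySem.Dict String (List (List (String × String)))) :=
  PySem.Dict.mk (pvDAYS.map (fun day =>
    (day, PySem.Dict.mk (pvSLOTS.map (fun slot => (slot, f day slot))))))

theorem pvGridF_congr {f g : String → String → List (List (String × String))}
    (h : ∀ d ∈ pvDAYS, ∀ s ∈ pvSLOTS, f d s = g d s) : pvGridF f = pvGridF g := by
  unfold pvGridF
  refine congrArg PySem.Dict.mk (List.map_congr_left (fun d hd => ?_))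
  exact congrArg _ (congrArg PySem.Dict.mk (List.map_congr_left (fun s hs => by rw [h d hd s hs])))

-- dicts of the shape {k: f(k) for k in ks}
theorem pv_contains_mk_map {ν : Type} (ks : List String) (f : String → ν) (k : String) :
    (PySem.Dict.mk (ks.map (fun d => (d, f d)))).contains k = decide (k ∈ ks) := by
  simp only [PySem.Dict.contains, List.any_map]
  induction ks with
  | nil => simp
  | cons a t ih =>
      by_cases h : a = k <;>
        simp [List.any_cons, Function.comp_apply, ih, h, Ne.symm, beq_false_of_ne]

theorem pv_getD_mk_map_mem {ν : Type} (ks : List String) (f : String → ν) (k : String)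
    (dflt : ν) (h : k ∈ ks) :
    (PySem.Dict.mk (ks.map (fun d => (d, f d)))).getD k dflt = f k := by
  induction ks with
  | nil => simp at h
  | cons a t ih =>
      by_cases ha : a = k
      · subst ha; simp [PySem.Dict.getD, PySem.Dict.get?]
      · have hk : k ∈ t := by
          rcases List.mem_cons.mp h with h1 | h1
          · exact absurd h1.symm ha
          · exact h1
        simpa [PySem.Dict.getD, PySem.Dict.get?, ha] using ih hk

theorem pv_modify_mk_map {ν : Type} (ks : List String) (f : String → ν) (k0 : String)
    (dflt : ν) (g : ν → ν) (h : k0 ∈ ks) :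
    (PySem.Dict.mk (ks.map (fun d => (d, f d)))).modify k0 dflt g
      = PySem.Dict.mk (ks.map (fun d => (d, if d = k0 then g (f k0) else f d))) := by
  have hc : (PySem.Dict.mk (ks.map (fun d => (d, f d)))).contains k0 = true := by
    simp [h]
  simp only [PySem.Dict.modify, PySem.Dict.insert, hc, if_pos,
    pv_getD_mk_map_mem ks f k0 dflt h]
  refine congrArg PySem.Dict.mk ?_
  rw [List.map_map]
  refine List.map_congr_left (fun d _ => ?_)
  by_cases hd : d = k0 <;> simp [hd]

-- one step of A on a grid of cells f appends x to exactly the cells whose predicate x satisfies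
theorem pv_stepA_gridF (f : String → String → List (List (String × String)))
    (x : List (String × String)) :
    pvStepA (pvGridF f) x
      = pvGridF (fun d s => f d s ++ (if pvCell d s x then [x] else [])) := by
  unfold pvStepA
  cases hd : pvGet x "day" with
  | none =>
      cases hs : pvGet x "time_slot" <;>
        · refine pvGridF_congr (fun d _ s _ => ?_)
          simp [pvCell, hd]
  | some d0 =>
      cases hs : pvGet x "time_slot" with
      | none =>
          refine pvGridF_congr (fun d _ s _ => ?_)
          simp [pvCell, hs]
      | some s0 =>
          by_cases hdm : d0 ∈ pvDAYS
          · by_cases hsm : s0 ∈ pvSLOTS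
            · -- valid location: the (d0, s0) cell gains x
              have hc : ((pvGridF f).contains d0
                  && ((pvGridF f).getD d0 PySem.Dict.empty).contains s0) = true := by
                unfold pvGridF
                rw [pv_getD_mk_map_mem _ _ _ _ hdm, pv_contains_mk_map, pv_contains_mk_map]
                simp [hdm, hsm]
              simp only [hc, if_true]
              unfold pvGridF
              rw [pv_modify_mk_map _ _ _ _ _ hdm]
              refine congrArg PySem.Dict.mk (List.map_congr_left (fun d _ => ?_))
              by_cases h1 : d = d0
              · subst h1
                rw [if_pos rfl, pv_modify_mk_map _ _ _ _ _ hsm]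
                refine congrArg _ (congrArg PySem.Dict.mk (List.map_congr_left (fun s _ => ?_)))
                by_cases h2 : s = s0
                · subst h2
                  have hcell : pvCell d s x = true := by simp [pvCell, hd, hs]
                  simp [hcell]
                · have hcell : pvCell d s x = false := by
                    simp [pvCell, hd, hs]
                    exact fun h => h2 h.symm
                  simp [hcell, h2]
              · simp only [if_neg h1]
                refine congrArg _ (congrArg PySem.Dict.mk (List.map_congr_left (fun s _ => ?_)))
                have : pvCell d s x = false := by
                  simp [pvCell, hd]
                  exact fun h => absurd h.symm h1
                simp [this]
            · -- slot never on the grid: no cell matches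
              have hc : ((pvGridF f).contains d0
                  && ((pvGridF f).getD d0 PySem.Dict.empty).contains s0) = false := by
                unfold pvGridF
                rw [pv_getD_mk_map_mem _ _ _ _ hdm, pv_contains_mk_map, pv_contains_mk_map]
                simp [hsm]
              simp only [hc, Bool.false_eq_true, if_false]
              refine pvGridF_congr (fun d _ s hsmem => ?_)
              have : pvCell d s x = false := by
                simp [pvCell, hs]
                intro _ h2
                exact hsm (h2 ▸ hsmem)
              simp [this]
          · -- day never on the grid: no cell matches
            have hc : ((pvGridF f).contains d0
                && ((pvGridF f).getD d0 PySem.Dict.empty).contains s0) = false := by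
              unfold pvGridF
              rw [pv_contains_mk_map]
              simp [hdm]
            simp only [hc, Bool.false_eq_true, if_false]
            refine pvGridF_congr (fun d hdmem s _ => ?_)
            have : pvCell d s x = false := by
              simp [pvCell, hd]
              intro h2
              exact absurd hdmem (h2 ▸ hdm)
            simp [this]

theorem pv_fold_gridF (xs : List (List (String × String)))
    (f : String → String → List (List (String × String))) :
    xs.foldl pvStepA (pvGridF f)
      = pvGridF (fun d s => f d s ++ xs.filter (pvCell d s)) := by
  induction xs generalizing f with
  | nil => exact pvGridF_congr (fun d _ s _ => by simp)
  | cons x t ih =>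
      rw [List.foldl_cons, pv_stepA_gridF, ih]
      refine pvGridF_congr (fun d _ s _ => ?_)
      by_cases h : pvCell d s x = true <;> simp [h]

theorem pv_init : PySem.Dict.ofList (pvDAYS.map (fun day =>
      (day, PySem.Dict.ofList (pvSLOTS.map (fun slot => (slot, ([] : List (List (String × String)))))))))
    = pvGridF (fun _ _ => []) := by decide

-- ===== VERDICT (by name: the statement is the Claim_ definition above) =====
theorem format_timetable_spec : Claim_equal_format_timetable := by
  intro schedule _
  unfold Spec_format_timetable format_timetable format_timetable_alt
  simp only [pv_init, pv_fold_gridF]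
  unfold pvGridF
  simp [List.map_map, Function.comp]
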